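-- pv_equiv track=rewrite | github.com/anandx00/pyhton-codes | resistence colour code.py | label
-- ===== SOURCE A (Python) =====
-- def label(colors):
--     k=['black', 'brown', 'red', 'orange', 'yellow', 'green', 'blue', 'violet', 'grey', 'white']
--     m=""
--     for i in range(3):
--         if i==2:
--             m+=f"{'0'*k.index(colors[i])}"
--         else:
--             m+=str(k.index(colors[i]))
--     z = list(map(lambda x:x ,m))
--     if z.count('0')<=2:
--         return str(int(m))+' ohms'
--     elif z.count('0')<=5 and z.count('0') >2:
--         return str(int(m)//10**3 )+' kiloohms'
--     elif z.count('0')<=8 and z.count('0') >5: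
--         return str(int(m)//10**6 )+' megaohms'
--     elif z.count('0')<=11 and z.count('0') >8:
--         return str(int(m)//10**9 )+' gigaohms'
--     elif z.count('0')<=14 and z.count('0') >11:
--         return str(int(m)//10**12 )+' teraohms'
--     elif z.count('0')<=17 and z.count('0') >14:
--         return str(int(m)//10**15 )+' petaohms'
-- ===== SOURCE B (Python) =====
-- def label(colors):
--     k = ['black', 'brown', 'red', 'orange', 'yellow', 'green', 'blue', 'violet', 'grey', 'white']
--     units = ['ohms', 'kiloohms', 'megaohms', 'gigaohms', 'teraohms', 'petaohms']
--     i0 = k.index(colors[0])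
--     i1 = k.index(colors[1])
--     i2 = k.index(colors[2])
--     value = (i0 * 10 + i1) * 10 ** i2
--     tier = i2 // 3
--     return str(value // 1000 ** tier) + ' ' + units[tier]
-- ===== Notes on version B (the rewrite author's own statement) =====
-- stated objective: simpler
-- what changed: B computes the resistance arithmetically as (i0*10+i1)*10**i2 with unit tier i2//3 indexing a unit table, replacing A's digit-string building, list(map) character counting and six-branch if/elif chain.
-- intended difference: On bands whose first or second colour is black and where those zero digits push A's '0'-character count across a multiple-of-3 boundary, A jumps to a larger unit (e.g. black-brown-red gives '0 kiloohms'), while B returns the physically correct value from the multiplier band alone ('100 ohms'), since leading zero digits carry no magnitude. — e.g. on label(["black", "brown", "red"]): A returns "0 kiloohms", B returns "100 ohms"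
import Mathlib
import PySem

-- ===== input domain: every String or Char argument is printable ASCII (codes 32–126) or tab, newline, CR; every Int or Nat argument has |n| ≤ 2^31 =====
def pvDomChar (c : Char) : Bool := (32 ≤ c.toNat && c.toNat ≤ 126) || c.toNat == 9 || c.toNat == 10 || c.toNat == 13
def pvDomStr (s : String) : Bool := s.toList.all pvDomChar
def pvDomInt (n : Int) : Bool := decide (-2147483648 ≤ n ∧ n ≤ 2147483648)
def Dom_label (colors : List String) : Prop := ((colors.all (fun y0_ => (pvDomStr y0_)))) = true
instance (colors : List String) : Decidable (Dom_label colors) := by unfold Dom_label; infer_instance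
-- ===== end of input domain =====

-- B computes the value arithmetically as (i0*10+i1)*10^i2 with unit tier i2//3, replacing A's
-- digit-string building, character counting and six-branch if/elif chain (objective: simpler);
-- it differs from A exactly where A counts leading zero digits toward the unit tier (D_ below).

-- the colour table both Python versions write as a literal
def colorNames : List String :=
  ["black", "brown", "red", "orange", "yellow", "green", "blue", "violet", "grey", "white"]

-- ===== PORT A =====
def label (colors : List String) : String :=
  -- m = "" ; for i in range(3): append '0'*k.index(colors[i]) if i==2 else str(k.index(colors[i]))
  let m : List Char :=
    (PySem.List.pyRange 0 3 1).foldl (fun m i =>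
      if i == 2 then
        m ++ List.replicate ((PySem.List.index? colorNames (PySem.List.pyGetD colors i "")).getD 0) '0'
      else
        m ++ PySem.Int.toChars (((PySem.List.index? colorNames (PySem.List.pyGetD colors i "")).getD 0 : Nat) : Int)) []
  -- z = list(map(lambda x: x, m))
  let z : List Char := m.map (fun x => x)
  -- int(m)  (m is always a nonempty digit string here, so the parse succeeds)
  let n : Int := (PySem.Int.ofChars? m).getD 0
  if PySem.List.count z '0' ≤ 2 then
    String.ofList (PySem.Int.toChars n ++ [' ', 'o', 'h', 'm', 's'])
  else if PySem.List.count z '0' ≤ 5 ∧ 2 < PySem.List.count z '0' then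
    String.ofList (PySem.Int.toChars (PySem.Int.floordiv n ((10 ^ 3 : Nat) : Int)) ++ [' ', 'k', 'i', 'l', 'o', 'o', 'h', 'm', 's'])
  else if PySem.List.count z '0' ≤ 8 ∧ 5 < PySem.List.count z '0' then
    String.ofList (PySem.Int.toChars (PySem.Int.floordiv n ((10 ^ 6 : Nat) : Int)) ++ [' ', 'm', 'e', 'g', 'a', 'o', 'h', 'm', 's'])
  else if PySem.List.count z '0' ≤ 11 ∧ 8 < PySem.List.count z '0' then
    String.ofList (PySem.Int.toChars (PySem.Int.floordiv n ((10 ^ 9 : Nat) : Int)) ++ [' ', 'g', 'i', 'g', 'a', 'o', 'h', 'm', 's'])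
  else if PySem.List.count z '0' ≤ 14 ∧ 11 < PySem.List.count z '0' then
    String.ofList (PySem.Int.toChars (PySem.Int.floordiv n ((10 ^ 12 : Nat) : Int)) ++ [' ', 't', 'e', 'r', 'a', 'o', 'h', 'm', 's'])
  else if PySem.List.count z '0' ≤ 17 ∧ 14 < PySem.List.count z '0' then
    String.ofList (PySem.Int.toChars (PySem.Int.floordiv n ((10 ^ 15 : Nat) : Int)) ++ [' ', 'p', 'e', 't', 'a', 'o', 'h', 'm', 's'])
  else "" -- Python falls through (returns None); unreachable, the count is at most 11

-- ===== PORT B =====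
-- units = ['ohms', 'kiloohms', 'megaohms', 'gigaohms', 'teraohms', 'petaohms']  (as Char lists)
def unitNames : List (List Char) :=
  [['o', 'h', 'm', 's'],
   ['k', 'i', 'l', 'o', 'o', 'h', 'm', 's'],
   ['m', 'e', 'g', 'a', 'o', 'h', 'm', 's'],
   ['g', 'i', 'g', 'a', 'o', 'h', 'm', 's'],
   ['t', 'e', 'r', 'a', 'o', 'h', 'm', 's'],
   ['p', 'e', 't', 'a', 'o', 'h', 'm', 's']]

def label_alt (colors : List String) : String :=
  let i0 : Nat := (PySem.List.index? colorNames (PySem.List.pyGetD colors 0 "")).getD 0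
  let i1 : Nat := (PySem.List.index? colorNames (PySem.List.pyGetD colors 1 "")).getD 0
  let i2 : Nat := (PySem.List.index? colorNames (PySem.List.pyGetD colors 2 "")).getD 0
  let value : Nat := (i0 * 10 + i1) * 10 ^ i2
  let tier : Nat := i2 / 3
  String.ofList (PySem.Int.toChars ((value / 1000 ^ tier : Nat) : Int)
    ++ ' ' :: PySem.List.pyGetD unitNames (tier : Int) [])

-- ===== PRECONDITION & SPEC =====
-- Pre_ excludes exactly the inputs where A raises: fewer than three colours (IndexError) or an
-- unknown colour among the first three (ValueError from list.index).
def Pre_label (colors : List String) : Prop :=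
  3 ≤ colors.length ∧ ∀ c ∈ colors.take 3, c ∈ colorNames
instance (colors : List String) : Decidable (Pre_label colors) := by unfold Pre_label; infer_instance

def pvWitness_label : List String := ["red", "black", "brown"]

-- On bands whose first or second colour is black and where those zero digits push A's
-- '0'-character count across a multiple-of-3 boundary, A jumps to a larger unit
-- (e.g. black-brown-red gives "0 kiloohms") while B returns the value from the multiplier
-- band alone ("100 ohms"), which is the intended resistance: leading zeros carry no magnitude.
def D_label (colors : List String) : Prop :=
  (colors.getD 0 "" = "black" ∧ colors.getD 1 "" = "black" ∧
    (colors.getD 2 "" = "brown" ∨ colors.getD 2 "" = "red" ∨ colors.getD 2 "" = "yellow" ∨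
     colors.getD 2 "" = "green" ∨ colors.getD 2 "" = "violet" ∨ colors.getD 2 "" = "grey"))
  ∨ (((colors.getD 0 "" = "black") ↔ ¬ colors.getD 1 "" = "black") ∧
    (colors.getD 2 "" = "red" ∨ colors.getD 2 "" = "green" ∨ colors.getD 2 "" = "grey"))
instance (colors : List String) : Decidable (D_label colors) := by unfold D_label; infer_instance

def Spec_label (colors : List String) (out : String) : Prop := ¬ D_label colors → out = label_alt colors
instance (colors : List String) (out : String) : Decidable (Spec_label colors out) := by unfold Spec_label; infer_instance

def pvDiffWitness_label : List String := ["black", "brown", "red"]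
def pvDiffWitnessOut_label : String × String := ("0 kiloohms", "100 ohms")

-- ===== CLAIM (what is proved, stated in full; the proofs are below) =====
def Claim_unchanged_label : Prop := ∀ (colors : List String), Dom_label colors → Pre_label colors → Spec_label colors (label colors)
def Claim_changed_label : Prop := Dom_label (pvDiffWitness_label) ∧ Pre_label (pvDiffWitness_label) ∧ D_label (pvDiffWitness_label) ∧ label (pvDiffWitness_label) = pvDiffWitnessOut_label.1 ∧ label_alt (pvDiffWitness_label) = pvDiffWitnessOut_label.2 ∧ pvDiffWitnessOut_label.1 ≠ pvDiffWitnessOut_label.2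
def Claim_exact_label : Prop := ∀ (colors : List String), Dom_label colors → Pre_label colors → D_label colors → label colors ≠ label_alt colors

-- ===== LEMMAS AND PROOFS =====

-- index of a colour in the table (0 as the never-used-under-Pre_ default)
def idxOf (s : String) : Nat := (PySem.List.index? colorNames s).getD 0

-- the digit string A builds, as a function of the three indices
def mChars (i0 i1 i2 : Nat) : List Char :=
  PySem.Int.toChars (i0 : Int) ++ PySem.Int.toChars (i1 : Int) ++ List.replicate i2 '0'

-- A's output characters after the three lookups
def gA (i0 i1 i2 : Nat) : List Char :=
  let m : List Char := mChars i0 i1 i2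
  let z : List Char := m.map (fun x => x)
  let n : Int := (PySem.Int.ofChars? m).getD 0
  if PySem.List.count z '0' ≤ 2 then
    PySem.Int.toChars n ++ [' ', 'o', 'h', 'm', 's']
  else if PySem.List.count z '0' ≤ 5 ∧ 2 < PySem.List.count z '0' then
    PySem.Int.toChars (PySem.Int.floordiv n ((10 ^ 3 : Nat) : Int)) ++ [' ', 'k', 'i', 'l', 'o', 'o', 'h', 'm', 's']
  else if PySem.List.count z '0' ≤ 8 ∧ 5 < PySem.List.count z '0' then
    PySem.Int.toChars (PySem.Int.floordiv n ((10 ^ 6 : Nat) : Int)) ++ [' ', 'm', 'e', 'g', 'a', 'o', 'h', 'm', 's']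
  else if PySem.List.count z '0' ≤ 11 ∧ 8 < PySem.List.count z '0' then
    PySem.Int.toChars (PySem.Int.floordiv n ((10 ^ 9 : Nat) : Int)) ++ [' ', 'g', 'i', 'g', 'a', 'o', 'h', 'm', 's']
  else if PySem.List.count z '0' ≤ 14 ∧ 11 < PySem.List.count z '0' then
    PySem.Int.toChars (PySem.Int.floordiv n ((10 ^ 12 : Nat) : Int)) ++ [' ', 't', 'e', 'r', 'a', 'o', 'h', 'm', 's']
  else if PySem.List.count z '0' ≤ 17 ∧ 14 < PySem.List.count z '0' then
    PySem.Int.toChars (PySem.Int.floordiv n ((10 ^ 15 : Nat) : Int)) ++ [' ', 'p', 'e', 't', 'a', 'o', 'h', 'm', 's']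
  else []

-- B's output characters after the three lookups
def gB (i0 i1 i2 : Nat) : List Char :=
  let value : Nat := (i0 * 10 + i1) * 10 ^ i2
  let tier : Nat := i2 / 3
  PySem.Int.toChars ((value / 1000 ^ tier : Nat) : Int)
    ++ ' ' :: PySem.List.pyGetD unitNames (tier : Int) []

lemma pyGetD_cons3 (a b c : String) (t : List String) :
    PySem.List.pyGetD (a::b::c::t) 0 "" = a ∧ PySem.List.pyGetD (a::b::c::t) 1 "" = b ∧
    PySem.List.pyGetD (a::b::c::t) 2 "" = c := by
  refine ⟨?_, ?_, ?_⟩ <;> simp [PySem.List.pyGetD_ofNat', List.getD]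

set_option maxHeartbeats 2000000 in
lemma label_eq_gA (a b c : String) (t : List String) :
    label (a :: b :: c :: t) = String.ofList (gA (idxOf a) (idxOf b) (idxOf c)) := by
  obtain ⟨h0, h1, h2⟩ := pyGetD_cons3 a b c t
  have hr : PySem.List.pyRange 0 3 1 = [0, 1, 2] := by decide
  simp only [label, gA, mChars, hr, List.foldl, h0, h1, h2, idxOf, List.nil_append,
    List.append_assoc]
  norm_num
  all_goals split_ifs <;> simp [String.ofList_append]

lemma label_alt_eq_gB (a b c : String) (t : List String) :
    label_alt (a :: b :: c :: t) = String.ofList (gB (idxOf a) (idxOf b) (idxOf c)) := by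
  obtain ⟨h0, h1, h2⟩ := pyGetD_cons3 a b c t
  simp only [label_alt, gB, h0, h1, h2, idxOf]

lemma idxOf_lt (s : String) (h : s ∈ colorNames) : idxOf s < 10 := by
  unfold colorNames at h
  simp only [List.mem_cons, List.not_mem_nil, or_false] at h
  rcases h with rfl|rfl|rfl|rfl|rfl|rfl|rfl|rfl|rfl|rfl <;> decide

-- core finite case analysis: agreement off the boundary condition, disagreement on it
set_option maxRecDepth 16384 in
lemma gA_vs_gB : ∀ i0 ∈ List.range 10, ∀ i1 ∈ List.range 10, ∀ i2 ∈ List.range 10,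
    (((if i0 = 0 then 1 else 0) + (if i1 = 0 then 1 else 0) + i2) / 3 = i2 / 3
        → gA i0 i1 i2 = gB i0 i1 i2)
    ∧ (((if i0 = 0 then 1 else 0) + (if i1 = 0 then 1 else 0) + i2) / 3 ≠ i2 / 3
        → gA i0 i1 i2 ≠ gB i0 i1 i2) := by decide

lemma D_iff (a b c : String) (t : List String)
    (ha : a ∈ colorNames) (hb : b ∈ colorNames) (hc : c ∈ colorNames) :
    D_label (a :: b :: c :: t) ↔
      ((if idxOf a = 0 then 1 else 0) + (if idxOf b = 0 then 1 else 0) + idxOf c) / 3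
        ≠ idxOf c / 3 := by
  unfold colorNames at ha hb hc
  simp only [List.mem_cons, List.not_mem_nil, or_false] at ha hb hc
  have ea : (a = "black") ↔ (idxOf a = 0) := by
    rcases ha with rfl|rfl|rfl|rfl|rfl|rfl|rfl|rfl|rfl|rfl <;> decide
  have eb : (b = "black") ↔ (idxOf b = 0) := by
    rcases hb with rfl|rfl|rfl|rfl|rfl|rfl|rfl|rfl|rfl|rfl <;> decide
  have ec : ((c = "brown" ∨ c = "red" ∨ c = "yellow" ∨ c = "green" ∨ c = "violet" ∨ c = "grey")
        ↔ idxOf c % 3 ≠ 0)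
      ∧ ((c = "red" ∨ c = "green" ∨ c = "grey") ↔ idxOf c % 3 = 2)
      ∧ idxOf c < 10 := by
    rcases hc with rfl|rfl|rfl|rfl|rfl|rfl|rfl|rfl|rfl|rfl <;> refine ⟨by decide, by decide, by decide⟩
  obtain ⟨ec1, ec2, hc10⟩ := ec
  simp only [D_label, List.getD_cons_zero, List.getD_cons_succ, ea, eb, ec1, ec2]
  by_cases h0 : idxOf a = 0 <;> by_cases h1 : idxOf b = 0 <;> simp [h0, h1] <;> omega

-- ===== VERDICT (by name: the statement is the Claim_ definition above) =====
theorem label_spec : Claim_unchanged_label := by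
  intro colors _ hpre hnd
  obtain ⟨hlen, hmem⟩ := hpre
  match colors, hlen with
  | a :: b :: c :: t, _ =>
    have ha := idxOf_lt a (hmem a (by simp))
    have hb := idxOf_lt b (hmem b (by simp))
    have hc := idxOf_lt c (hmem c (by simp))
    rw [D_iff a b c t (hmem a (by simp)) (hmem b (by simp)) (hmem c (by simp)), not_ne_iff] at hnd
    show label (a :: b :: c :: t) = label_alt (a :: b :: c :: t)
    rw [label_eq_gA, label_alt_eq_gB,
      (gA_vs_gB _ (List.mem_range.mpr ha) _ (List.mem_range.mpr hb) _ (List.mem_range.mpr hc)).1 hnd]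

theorem label_changed : Claim_changed_label := by unfold Claim_changed_label; decide

theorem label_tight : Claim_exact_label := by
  intro colors _ hpre hd
  obtain ⟨hlen, hmem⟩ := hpre
  match colors, hlen with
  | a :: b :: c :: t, _ =>
    have ha := idxOf_lt a (hmem a (by simp))
    have hb := idxOf_lt b (hmem b (by simp))
    have hc := idxOf_lt c (hmem c (by simp))
    rw [D_iff a b c t (hmem a (by simp)) (hmem b (by simp)) (hmem c (by simp))] at hd
    show label (a :: b :: c :: t) ≠ label_alt (a :: b :: c :: t)
    rw [label_eq_gA, label_alt_eq_gB]
    intro heq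
    exact (gA_vs_gB _ (List.mem_range.mpr ha) _ (List.mem_range.mpr hb) _ (List.mem_range.mpr hc)).2 hd (String.ofList_inj.mp heq)
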